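-- pv_equiv track=rewrite | github.com/E-delweiss/Cul_de_Chouette | CDC_modules/CDC_fonctions.py | la_chouette
-- ===== SOURCE A (Python) =====
-- def la_chouette(dico_dice):
--     """
--     Applique la règle de La Chouette
--
--     Parameters
--     ----------
--     dico_dice : dict
--         Score des dés chouette_1, chouette_2, cul.
--
--     Returns
--     -------
--     score : int
--         Score de la combinaison.
--
--     """
--     chouette_1 = dico_dice['chouette_1']
--     chouette_2 = dico_dice['chouette_2']
--     cul        = dico_dice['cul']
--
--     score_dice = [chouette_1, chouette_2, cul]
--     for i in range(1,7):
--         doublon = score_dice.count(i)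
--
--         if doublon == 2:
--             chouette = i
--             score = chouette**2
--             return score
-- ===== SOURCE B (Python) =====
-- def la_chouette(dico_dice):
--     c1 = dico_dice['chouette_1']
--     c2 = dico_dice['chouette_2']
--     cul = dico_dice['cul']
--     if c1 == c2 and c1 != cul:
--         pair = c1
--     elif c1 == cul and c1 != c2:
--         pair = c1
--     elif c2 == cul and c2 != c1:
--         pair = c2
--     else:
--         return None
--     return pair * pair
-- ===== Notes on version B (the rewrite author's own statement) =====
-- stated objective: simpler
-- what changed: B replaces A's loop over range(1,7) with count() calls by three direct pairwise equality tests on the dice, returning the doubled value squared.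
-- outside the precondition, e.g. on la_chouette({'chouette_1': 7, 'chouette_2': 7, 'cul': 1}): A returns None, B returns 49; on la_chouette({'chouette_1': 2, 'chouette_2': 3, 'cul': 4}): A returns None, B returns None; on la_chouette({'chouette_1': 5}): A raises KeyError, B raises KeyError
import Mathlib
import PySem

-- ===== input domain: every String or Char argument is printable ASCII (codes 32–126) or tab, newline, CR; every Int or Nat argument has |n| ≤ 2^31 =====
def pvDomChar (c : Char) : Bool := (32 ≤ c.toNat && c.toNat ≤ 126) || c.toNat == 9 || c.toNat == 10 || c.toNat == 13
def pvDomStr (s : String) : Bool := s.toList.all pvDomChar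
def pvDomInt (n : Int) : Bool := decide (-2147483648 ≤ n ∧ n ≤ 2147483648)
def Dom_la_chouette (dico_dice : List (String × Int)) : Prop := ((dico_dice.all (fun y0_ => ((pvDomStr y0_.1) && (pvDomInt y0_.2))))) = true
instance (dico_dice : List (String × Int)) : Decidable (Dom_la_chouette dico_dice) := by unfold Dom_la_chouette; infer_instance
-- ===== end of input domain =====

-- B replaces A's loop over range(1,7) with count() by three direct pairwise
-- equality tests on the dice; objective: simpler (same behaviour on Pre_).

-- ===== PORT A =====
-- the 'for i in range(1,7): … return score' loop; returns 0 where the Python loop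
-- falls through (Python returns None) — such inputs are excluded by Pre_la_chouette
def chouetteLoop (score_dice : List Int) : List Int → Int
  | [] => 0
  | i :: rest =>
      if PySem.List.count score_dice i = 2 then i ^ 2 else chouetteLoop score_dice rest

def la_chouette (dico_dice : List (String × Int)) : Int :=
  let chouette_1 := ((PySem.Dict.mk dico_dice).get? "chouette_1").getD 0
  let chouette_2 := ((PySem.Dict.mk dico_dice).get? "chouette_2").getD 0
  let cul        := ((PySem.Dict.mk dico_dice).get? "cul").getD 0
  let score_dice := [chouette_1, chouette_2, cul]
  chouetteLoop score_dice (PySem.List.pyRange 1 7 1)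

-- ===== PORT B =====
-- returns 0 where Python B returns None — such inputs are excluded by Pre_la_chouette
def la_chouette_alt (dico_dice : List (String × Int)) : Int :=
  let c1  := ((PySem.Dict.mk dico_dice).get? "chouette_1").getD 0
  let c2  := ((PySem.Dict.mk dico_dice).get? "chouette_2").getD 0
  let cul := ((PySem.Dict.mk dico_dice).get? "cul").getD 0
  if c1 = c2 ∧ c1 ≠ cul then c1 * c1
  else if c1 = cul ∧ c1 ≠ c2 then c1 * c1
  else if c2 = cul ∧ c2 ≠ c1 then c2 * c2
  else 0

-- ===== PRECONDITION & SPEC =====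
-- Pre_ excludes exactly the inputs on which Python A does not return an int: a
-- missing key (KeyError) or no value in 1..6 occurring exactly twice among the
-- three dice (A's loop falls through and A returns None, not an int).
def Pre_la_chouette (dico_dice : List (String × Int)) : Prop :=
  ((PySem.Dict.mk dico_dice).get? "chouette_1").isSome ∧
  ((PySem.Dict.mk dico_dice).get? "chouette_2").isSome ∧
  ((PySem.Dict.mk dico_dice).get? "cul").isSome ∧
  (let c1  := ((PySem.Dict.mk dico_dice).get? "chouette_1").getD 0
   let c2  := ((PySem.Dict.mk dico_dice).get? "chouette_2").getD 0
   let cul := ((PySem.Dict.mk dico_dice).get? "cul").getD 0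
   (c1 = c2 ∧ c1 ≠ cul ∧ 1 ≤ c1 ∧ c1 ≤ 6) ∨
   (c1 = cul ∧ c1 ≠ c2 ∧ 1 ≤ c1 ∧ c1 ≤ 6) ∨
   (c2 = cul ∧ c2 ≠ c1 ∧ 1 ≤ c2 ∧ c2 ≤ 6))

instance (dico_dice : List (String × Int)) : Decidable (Pre_la_chouette dico_dice) := by
  unfold Pre_la_chouette; infer_instance

def pvWitness_la_chouette : (List (String × Int)) :=
  [("chouette_1", 3), ("chouette_2", 3), ("cul", 5)]

def Spec_la_chouette (dico_dice : List (String × Int)) (out : Int) : Prop := out = la_chouette_alt dico_dice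
instance (dico_dice : List (String × Int)) (out : Int) : Decidable (Spec_la_chouette dico_dice out) := by unfold Spec_la_chouette; infer_instance

-- ===== CLAIM (what is proved, stated in full; the proofs are below) =====
def Claim_equal_la_chouette : Prop := ∀ (dico_dice : List (String × Int)), Dom_la_chouette dico_dice → Pre_la_chouette dico_dice → Spec_la_chouette dico_dice (la_chouette dico_dice)

-- ===== LEMMAS AND PROOFS =====

-- A's loop returns p ^ 2 as soon as it reaches the unique value p of count 2
theorem chouetteLoop_finds (sd : List Int) (p : Int) (l : List Int)
    (hmem : p ∈ l) (hcnt : PySem.List.count sd p = 2)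
    (huniq : ∀ i ∈ l, i ≠ p → PySem.List.count sd i ≠ 2) :
    chouetteLoop sd l = p ^ 2 := by
  induction l with
  | nil => cases hmem
  | cons i rest ih =>
      by_cases hip : i = p
      · subst hip
        have hcnt' : List.count i sd = 2 := by simpa [PySem.List.count_eq] using hcnt
        simp [chouetteLoop, hcnt']
      · have hne : PySem.List.count sd i ≠ 2 := huniq i (List.mem_cons_self ..) hip
        have hne' : ¬ List.count i sd = 2 := by simpa [PySem.List.count_eq] using hne
        have hstep : chouetteLoop sd (i :: rest) = chouetteLoop sd rest := by
          simp [chouetteLoop, hne']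
        rw [hstep]
        refine ih ?_ (fun j hj hjp => huniq j (List.mem_cons_of_mem _ hj) hjp)
        rcases List.mem_cons.mp hmem with h | h
        · exact absurd h.symm hip
        · exact h

-- the core equality over the three extracted dice values
theorem chouetteLoop_eq_alt (c1 c2 cul : Int)
    (hp : (c1 = c2 ∧ c1 ≠ cul ∧ 1 ≤ c1 ∧ c1 ≤ 6) ∨
          (c1 = cul ∧ c1 ≠ c2 ∧ 1 ≤ c1 ∧ c1 ≤ 6) ∨
          (c2 = cul ∧ c2 ≠ c1 ∧ 1 ≤ c2 ∧ c2 ≤ 6)) :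
    chouetteLoop [c1, c2, cul] (PySem.List.pyRange 1 7 1) =
      (if c1 = c2 ∧ c1 ≠ cul then c1 * c1
       else if c1 = cul ∧ c1 ≠ c2 then c1 * c1
       else if c2 = cul ∧ c2 ≠ c1 then c2 * c2
       else 0) := by
  rcases hp with ⟨h1, h2, h3, h4⟩ | ⟨h1, h2, h3, h4⟩ | ⟨h1, h2, h3, h4⟩
  · rw [if_pos ⟨h1, h2⟩, ← pow_two]
    refine chouetteLoop_finds _ c1 _ (PySem.List.mem_pyRange_one.mpr ⟨h3, by omega⟩) ?_ ?_
    · simp only [PySem.List.count_eq, List.count_cons, List.count_nil, beq_iff_eq]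
      split_ifs <;> omega
    · intro i _ hip
      simp only [PySem.List.count_eq, List.count_cons, List.count_nil, beq_iff_eq]
      split_ifs <;> omega
  · rw [if_neg (by omega), if_pos ⟨h1, h2⟩, ← pow_two]
    refine chouetteLoop_finds _ c1 _ (PySem.List.mem_pyRange_one.mpr ⟨h3, by omega⟩) ?_ ?_
    · simp only [PySem.List.count_eq, List.count_cons, List.count_nil, beq_iff_eq]
      split_ifs <;> omega
    · intro i _ hip
      simp only [PySem.List.count_eq, List.count_cons, List.count_nil, beq_iff_eq]
      split_ifs <;> omega
  · rw [if_neg (by omega), if_neg (by omega), if_pos ⟨h1, h2⟩, ← pow_two]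
    refine chouetteLoop_finds _ c2 _ (PySem.List.mem_pyRange_one.mpr ⟨h3, by omega⟩) ?_ ?_
    · simp only [PySem.List.count_eq, List.count_cons, List.count_nil, beq_iff_eq]
      split_ifs <;> omega
    · intro i _ hip
      simp only [PySem.List.count_eq, List.count_cons, List.count_nil, beq_iff_eq]
      split_ifs <;> omega

-- ===== VERDICT (by name: the statement is the Claim_ definition above) =====
theorem la_chouette_spec : Claim_equal_la_chouette := by
  intro d _ hpre
  obtain ⟨-, -, -, hp⟩ := hpre
  unfold Spec_la_chouette la_chouette la_chouette_alt
  exact chouetteLoop_eq_alt _ _ _ hp
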